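-- pv_equiv track=rewrite | github.com/blackstream-x/smallparts | smallparts/sequences.py | raw_join
-- ===== SOURCE A (Python) =====
-- DEFAULT_JOINER = ','
--
-- EMPTY = ''
--
-- def raw_join(iterable,
--              prefix=None,
--              joiner=None,
--              final_joiner=None,
--              suffix=None):
--     """Return a unicode string containing the list items
--     joined together according to the provided parameters
--     """
--     if joiner is None:
--         joiner = DEFAULT_JOINER
--     #
--     final_joiner = final_joiner or joiner
--     words_sequence = [str(item) for item in iterable]
--     items_list = words_sequence[:-2]
--     items_list.append(final_joiner. join(words_sequence[-2:]))
--     return EMPTY.join((prefix or EMPTY,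
--                        joiner.join(items_list),
--                        suffix or EMPTY))
-- ===== SOURCE B (Python) =====
-- DEFAULT_JOINER = ','
--
-- EMPTY = ''
--
--
-- def raw_join(iterable,
--              prefix=None,
--              joiner=None,
--              final_joiner=None,
--              suffix=None):
--     """Collect the output tokens back-to-front: walk the words in reverse,
--     pushing a separator before each word after the first, where the separator
--     variable starts as final_joiner and degrades to joiner once used; then
--     assemble with a single ''.join over the reversed token list."""
--     if joiner is None:
--         joiner = DEFAULT_JOINER
--     final_joiner = final_joiner or joiner
--     pieces = []
--     separator = final_joiner
--     for item in reversed(list(iterable)):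
--         word = str(item)
--         if pieces:
--             pieces.append(separator)
--             separator = joiner
--         pieces.append(word)
--     return (prefix or EMPTY) + EMPTY.join(reversed(pieces)) + (suffix or EMPTY)
-- ===== Notes on version B (the rewrite author's own statement) =====
-- stated objective: alternative
-- what changed: B walks the words in reverse collecting a flat token list (a separator variable that starts as final_joiner and degrades to joiner is pushed before each word after the first) and assembles it with one ''.join over the reversed tokens; A instead pre-merges the final pair with final_joiner via str.join, re-appends it to the [:-2] slice, str.joins that with joiner and wraps with a third ''.join.
import Mathlib
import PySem

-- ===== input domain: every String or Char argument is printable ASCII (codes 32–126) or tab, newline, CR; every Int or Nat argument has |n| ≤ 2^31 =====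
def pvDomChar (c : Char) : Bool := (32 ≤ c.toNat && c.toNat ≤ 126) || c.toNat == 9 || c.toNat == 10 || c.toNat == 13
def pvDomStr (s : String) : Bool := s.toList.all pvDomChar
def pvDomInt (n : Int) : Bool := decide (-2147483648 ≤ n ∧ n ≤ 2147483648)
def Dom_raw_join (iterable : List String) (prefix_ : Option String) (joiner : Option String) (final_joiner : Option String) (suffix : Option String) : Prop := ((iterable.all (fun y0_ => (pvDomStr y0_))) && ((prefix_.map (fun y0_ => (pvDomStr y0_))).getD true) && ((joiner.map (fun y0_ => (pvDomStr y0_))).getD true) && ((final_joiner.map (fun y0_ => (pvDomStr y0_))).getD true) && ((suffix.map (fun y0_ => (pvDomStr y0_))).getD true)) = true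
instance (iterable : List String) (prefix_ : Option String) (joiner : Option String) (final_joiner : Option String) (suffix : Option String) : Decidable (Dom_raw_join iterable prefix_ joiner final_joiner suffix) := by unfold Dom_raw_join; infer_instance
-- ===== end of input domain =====

-- B collects output tokens back-to-front with a degrading separator variable and one ''.join, instead of A's pre-merge of the final pair plus slice-and-double-join; objective: alternative.


-- ===== PORT A =====
def raw_join (iterable : List String) (prefix_ : Option String) (joiner : Option String) (final_joiner : Option String) (suffix : Option String) : String :=
  -- joiner is None -> DEFAULT_JOINER
  let j := joiner.getD ","
  -- final_joiner = final_joiner or joiner  (falsy: None or "")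
  let fj := match final_joiner with | none => j | some s => if s = "" then j else s
  -- words_sequence = [str(item) for item in iterable]; str is the identity on strings
  let words_sequence := iterable
  -- items_list = words_sequence[:-2]
  let items_list := PySem.List.slice words_sequence none (some (-2))
  -- items_list.append(final_joiner.join(words_sequence[-2:]))
  let items_list := items_list ++ [PySem.Str.join fj (PySem.List.slice words_sequence (some (-2)) none)]
  -- EMPTY.join((prefix or EMPTY, joiner.join(items_list), suffix or EMPTY)); x or EMPTY = getD "" on Option String
  PySem.Str.join "" [prefix_.getD "", PySem.Str.join j items_list, suffix.getD ""]

-- ===== PORT B =====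
def raw_join_alt (iterable : List String) (prefix_ : Option String) (joiner : Option String) (final_joiner : Option String) (suffix : Option String) : String :=
  let j := joiner.getD ","
  let fj := match final_joiner with | none => j | some s => if s = "" then j else s
  -- for item in reversed(words): push separator (then degrade it to j) before each word after the first, push the word
  let st := iterable.reverse.foldl
      (fun st word =>
        if st.1 = [] then (st.1 ++ [word], st.2)
        else (st.1 ++ [st.2, word], j))
      (([] : List String), fj)
  -- (prefix or EMPTY) + EMPTY.join(reversed(pieces)) + (suffix or EMPTY)
  (prefix_.getD "") ++ PySem.Str.join "" st.1.reverse ++ (suffix.getD "")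

-- ===== PRECONDITION & SPEC =====
def Spec_raw_join (iterable : List String) (prefix_ : Option String) (joiner : Option String) (final_joiner : Option String) (suffix : Option String) (out : String) : Prop := out = raw_join_alt iterable prefix_ joiner final_joiner suffix
instance (iterable : List String) (prefix_ : Option String) (joiner : Option String) (final_joiner : Option String) (suffix : Option String) (out : String) : Decidable (Spec_raw_join iterable prefix_ joiner final_joiner suffix out) := by unfold Spec_raw_join; infer_instance

-- ===== CLAIM (what is proved, stated in full; the proofs are below) =====
def Claim_equal_raw_join : Prop := ∀ (iterable : List String) (prefix_ : Option String) (joiner : Option String) (final_joiner : Option String) (suffix : Option String), Dom_raw_join iterable prefix_ joiner final_joiner suffix → Spec_raw_join iterable prefix_ joiner final_joiner suffix (raw_join iterable prefix_ joiner final_joiner suffix)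

-- ===== LEMMAS AND PROOFS =====
theorem join_cons_of_ne_nil (sep c : List Char) (m : List (List Char)) (hm : m ≠ []) :
    PySem.Chars.join sep (c :: m) = c ++ sep ++ PySem.Chars.join sep m := by
  cases m with
  | nil => exact absurd rfl hm
  | cons q rest => exact PySem.Chars.join_cons_cons sep c q rest

-- once pieces is nonempty and the separator has degraded, each step appends [j, word]
theorem foldl_pieces_const (j : String) (zs : List String) (p0 : List String) (h : p0 ≠ []) :
    zs.foldl (fun st word => if st.1 = [] then (st.1 ++ [word], st.2) else (st.1 ++ [st.2, word], j)) (p0, j) =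
      (p0 ++ zs.flatMap (fun w => [j, w]), j) := by
  induction zs generalizing p0 with
  | nil => simp
  | cons w zs ih =>
      rw [List.foldl_cons, if_neg (by simp [h]), ih _ (by simp)]
      simp

-- reversing the [j, w]-token stream turns it into the [w, j] stream over the original order
theorem reverse_flatMap_pair (j : String) (zs : List String) :
    (zs.flatMap (fun w => [j, w])).reverse = zs.reverse.flatMap (fun w => [w, j]) := by
  induction zs with
  | nil => rfl
  | cons w zs ih => simp [ih]

-- ''.join of the interleaved token list is the joiner-join with the merged final pair
theorem join_tokens (j fj a b : String) (ys : List String) :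
    PySem.Chars.join [] (List.map String.toList (ys.flatMap (fun w => [w, j]) ++ [a, fj, b])) =
      PySem.Chars.join j.toList (ys.map String.toList ++ [a.toList ++ fj.toList ++ b.toList]) := by
  induction ys with
  | nil => simp [PySem.Chars.join_cons_cons, PySem.Chars.join_singleton]
  | cons c ys ih =>
      have h1 : PySem.Chars.join ([] : List Char)
          (j.toList :: (List.map String.toList (List.flatMap (fun w => [w, j]) ys) ++
            [a.toList, fj.toList, b.toList])) =
          j.toList ++ [] ++ PySem.Chars.join []
            (List.map String.toList (List.flatMap (fun w => [w, j]) ys) ++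
              [a.toList, fj.toList, b.toList]) :=
        join_cons_of_ne_nil _ _ _ (by simp)
      have hc : PySem.Chars.join j.toList
          (c.toList :: (List.map String.toList ys ++ [a.toList ++ (fj.toList ++ b.toList)])) =
          c.toList ++ j.toList ++
            PySem.Chars.join j.toList (List.map String.toList ys ++ [a.toList ++ (fj.toList ++ b.toList)]) :=
        join_cons_of_ne_nil _ _ _ (by simp)
      simp only [List.flatMap_cons, List.append_assoc, List.map_append, List.map_cons,
        List.map_nil, List.cons_append, List.nil_append] at ih ⊢
      rw [PySem.Chars.join_cons_cons, h1, ih, hc]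
      simp [List.append_assoc]

theorem raw_join_spec : Claim_equal_raw_join := by
  intro it pre jo fjo su _
  unfold Spec_raw_join raw_join raw_join_alt
  rw [← String.toList_inj]
  rcases it.eq_nil_or_concat with rfl | ⟨l, b, rfl⟩
  · simp [PySem.Str.toList_join, String.toList_append, PySem.Chars.join_cons_cons,
      PySem.Chars.join_singleton, PySem.Chars.join_nil, PySem.List.slice]
  rcases l.eq_nil_or_concat with rfl | ⟨ys, a, rfl⟩
  · simp [PySem.Str.toList_join, String.toList_append, PySem.Chars.join_cons_cons,
      PySem.Chars.join_singleton, PySem.List.slice]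
  · simp only [List.concat_eq_append]
    have hlen : (ys ++ [a, b]).length = ys.length + 2 := by simp
    have h2 : PySem.List.slice (ys ++ [a, b]) none (some (-2)) = ys := by
      rw [PySem.List.slice_to_neg_ofNat _ 2 (by omega), hlen]
      simp
    have h3 : PySem.List.slice (ys ++ [a, b]) (some (-2)) none = [a, b] := by
      rw [PySem.List.slice_from_neg_ofNat _ 2 (by omega), hlen]
      simp
    simp only [List.append_assoc, List.singleton_append] at *
    have hrev : (ys ++ [a, b]).reverse = b :: a :: ys.reverse := by simp
    simp only [h2, h3]
    rw [hrev]
    set j := jo.getD "," with hj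
    set fj := (match fjo with
      | none => jo.getD ","
      | some s => if s = "" then jo.getD "," else s) with hfj
    rw [show List.foldl
          (fun st word => if st.1 = [] then (st.1 ++ [word], st.2) else (st.1 ++ [st.2, word], j))
          (([] : List String), fj) (b :: a :: ys.reverse) =
        List.foldl
          (fun st word => if st.1 = [] then (st.1 ++ [word], st.2) else (st.1 ++ [st.2, word], j))
          ([b, fj, a], j) ys.reverse from rfl]
    rw [foldl_pieces_const j ys.reverse [b, fj, a] (by simp)]
    simp only [List.reverse_cons, List.reverse_nil, List.nil_append,
      List.append_assoc, List.cons_append, reverse_flatMap_pair, List.reverse_reverse]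
    simp only [PySem.Str.toList_join, String.toList_append, List.map_append, List.map_cons,
      List.map_nil, PySem.Chars.join_cons_cons, PySem.Chars.join_singleton]
    have jt := join_tokens j fj a b ys
    simp only [List.map_append, List.map_cons, List.map_nil] at jt
    simp only [show "".toList = ([] : List Char) from rfl]
    rw [jt]
    simp [List.append_assoc]
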